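-- pv_equiv track=rewrite | github.com/wshake7/template | .github/scripts/optimize_skills.py | infer_skill_ids
-- ===== SOURCE A (Python) =====
-- def infer_skill_ids(files: list[str]) -> list[str]:
--     ids: set[str] = set()
--     for file in files:
--         if file.startswith("front/"):
--             ids.add("frontend-admin-react")
--         if file.startswith("backend/admin/"):
--             ids.add("backend-admin-service")
--         elif file.startswith("backend/go-common/"):
--             ids.add("backend-go-common")
--         elif file.startswith("backend/orm-crud/"):
--             ids.add("backend-orm-crud")
--     return sorted(ids)
-- ===== SOURCE B (Python) =====
-- _SKILL_PREFIXES = [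
--     ("front/", "frontend-admin-react"),
--     ("backend/admin/", "backend-admin-service"),
--     ("backend/go-common/", "backend-go-common"),
--     ("backend/orm-crud/", "backend-orm-crud"),
-- ]
--
--
-- def infer_skill_ids(files: list[str]) -> list[str]:
--     return sorted(skill for prefix, skill in _SKILL_PREFIXES
--                   if any(f.startswith(prefix) for f in files))
-- ===== Notes on version B (the rewrite author's own statement) =====
-- stated objective: idiomatic
-- what changed: Replaced the per-file if/elif branch cascade accumulating a set with a declarative prefix->skill table scanned in the outer loop, including each skill whose prefix matches some file via any(); valid because the backend prefixes are mutually exclusive, so the elif chain collapses to independent mappings.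
import Mathlib
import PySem

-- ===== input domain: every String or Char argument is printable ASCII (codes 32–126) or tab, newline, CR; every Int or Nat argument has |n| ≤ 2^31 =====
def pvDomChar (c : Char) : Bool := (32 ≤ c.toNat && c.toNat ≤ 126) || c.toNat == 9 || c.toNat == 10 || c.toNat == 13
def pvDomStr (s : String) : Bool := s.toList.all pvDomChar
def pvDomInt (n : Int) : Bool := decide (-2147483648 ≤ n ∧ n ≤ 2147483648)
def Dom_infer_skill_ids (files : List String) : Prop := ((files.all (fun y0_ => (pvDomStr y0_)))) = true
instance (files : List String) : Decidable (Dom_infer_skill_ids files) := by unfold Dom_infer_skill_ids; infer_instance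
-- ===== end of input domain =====

-- B replaces A's per-file if/elif cascade over a mutating set by a declarative
-- prefix->skill table filtered with any() over the files (idiomatic, same cost).


-- ===== PORT A =====
-- one iteration of A's loop body: the independent `if front/` plus the backend elif chain
def pvStepA (ids : PySem.Set String) (file : String) : PySem.Set String :=
  let ids := if PySem.Str.startswith file "front/" then PySem.Set.add ids "frontend-admin-react" else ids
  if PySem.Str.startswith file "backend/admin/" then PySem.Set.add ids "backend-admin-service"
  else if PySem.Str.startswith file "backend/go-common/" then PySem.Set.add ids "backend-go-common"
  else if PySem.Str.startswith file "backend/orm-crud/" then PySem.Set.add ids "backend-orm-crud"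
  else ids

def infer_skill_ids (files : List String) : List String :=
  let ids : PySem.Set String := files.foldl pvStepA PySem.Set.empty
  PySem.List.sorted ids (fun x => x) false

-- ===== PORT B =====
def pvSkillPrefixes : List (String × String) :=
  [("front/", "frontend-admin-react"),
   ("backend/admin/", "backend-admin-service"),
   ("backend/go-common/", "backend-go-common"),
   ("backend/orm-crud/", "backend-orm-crud")]

def infer_skill_ids_alt (files : List String) : List String :=
  PySem.List.sorted
    ((pvSkillPrefixes.filter
        (fun p => files.any (fun f => PySem.Str.startswith f p.1))).map Prod.snd)
    (fun x => x) false

-- ===== PRECONDITION & SPEC =====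
def Spec_infer_skill_ids (files : List String) (out : List String) : Prop := out = infer_skill_ids_alt files
instance (files : List String) (out : List String) : Decidable (Spec_infer_skill_ids files out) := by unfold Spec_infer_skill_ids; infer_instance

-- ===== CLAIM (what is proved, stated in full; the proofs are below) =====
def Claim_equal_infer_skill_ids : Prop := ∀ (files : List String), Dom_infer_skill_ids files → Spec_infer_skill_ids files (infer_skill_ids files)

-- ===== LEMMAS AND PROOFS =====

-- the four backend prefixes are mutually exclusive (no file starts with two of them)
theorem pv_sw_excl (f p q : String) (hpq : ¬ p.toList <+: q.toList) (hqp : ¬ q.toList <+: p.toList)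
    (h1 : PySem.Str.startswith f p = true) (h2 : PySem.Str.startswith f q = true) : False := by
  simp only [PySem.Str.startswith_eq, PySem.Chars.startswith_iff] at h1 h2
  rcases List.prefix_or_prefix_of_prefix h1 h2 with h | h <;> contradiction

-- per-file membership characterisation of A's loop body
def pvQ (f x : String) : Prop :=
  (x = "frontend-admin-react" ∧ PySem.Str.startswith f "front/" = true) ∨
  (x = "backend-admin-service" ∧ PySem.Str.startswith f "backend/admin/" = true) ∨
  (x = "backend-go-common" ∧ PySem.Str.startswith f "backend/go-common/" = true) ∨
  (x = "backend-orm-crud" ∧ PySem.Str.startswith f "backend/orm-crud/" = true)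

theorem pv_mem_step (acc : PySem.Set String) (f x : String) :
    x ∈ pvStepA acc f ↔ x ∈ acc ∨ pvQ f x := by
  have hag := pv_sw_excl f "backend/admin/" "backend/go-common/" (by decide) (by decide)
  have hao := pv_sw_excl f "backend/admin/" "backend/orm-crud/" (by decide) (by decide)
  have hgo := pv_sw_excl f "backend/go-common/" "backend/orm-crud/" (by decide) (by decide)
  unfold pvStepA pvQ
  split_ifs with h1 h2 h3 h4 <;>
    simp_all [PySem.Set.mem_add] <;> tauto

theorem pv_nodup_step (acc : PySem.Set String) (f : String) (h : acc.Nodup) :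
    (pvStepA acc f).Nodup := by
  unfold pvStepA
  split_ifs <;> repeat' apply PySem.Set.nodup_add
  all_goals exact h

theorem pv_mem_fold (files : List String) (acc : PySem.Set String) (x : String) :
    x ∈ files.foldl pvStepA acc ↔ x ∈ acc ∨ ∃ f ∈ files, pvQ f x := by
  induction files generalizing acc with
  | nil => simp
  | cons f fs ih =>
    simp only [List.foldl_cons, ih, pv_mem_step, List.mem_cons]
    constructor
    · rintro ((h | h) | ⟨g, hg, hq⟩)
      · exact Or.inl h
      · exact Or.inr ⟨f, Or.inl rfl, h⟩
      · exact Or.inr ⟨g, Or.inr hg, hq⟩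
    · rintro (h | ⟨g, (rfl | hg), hq⟩)
      · exact Or.inl (Or.inl h)
      · exact Or.inl (Or.inr hq)
      · exact Or.inr ⟨g, hg, hq⟩

theorem pv_nodup_fold (files : List String) (acc : PySem.Set String) (h : acc.Nodup) :
    (files.foldl pvStepA acc).Nodup := by
  induction files generalizing acc with
  | nil => exact h
  | cons f fs ih => exact ih _ (pv_nodup_step acc f h)

-- ===== VERDICT (by name: the statement is the Claim_ definition above) =====
theorem infer_skill_ids_spec : Claim_equal_infer_skill_ids := by
  intro files _
  unfold Spec_infer_skill_ids infer_skill_ids infer_skill_ids_alt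
  apply PySem.List.sorted_eq_sorted_of_perm _ _ _ (fun a b h => h)
  apply (List.perm_ext_iff_of_nodup (pv_nodup_fold files _ List.nodup_nil) ?_).2
  · intro x
    rw [pv_mem_fold]
    simp only [List.not_mem_nil, false_or, List.mem_map, List.mem_filter, pvSkillPrefixes,
      List.any_eq_true, pvQ, List.mem_cons, List.not_mem_nil]
    constructor
    · rintro ⟨f, hf, (⟨rfl, h⟩ | ⟨rfl, h⟩ | ⟨rfl, h⟩ | ⟨rfl, h⟩)⟩
      · exact ⟨("front/", "frontend-admin-react"), ⟨by simp, ⟨f, hf, by simpa using h⟩⟩, rfl⟩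
      · exact ⟨("backend/admin/", "backend-admin-service"), ⟨by simp, ⟨f, hf, by simpa using h⟩⟩, rfl⟩
      · exact ⟨("backend/go-common/", "backend-go-common"), ⟨by simp, ⟨f, hf, by simpa using h⟩⟩, rfl⟩
      · exact ⟨("backend/orm-crud/", "backend-orm-crud"), ⟨by simp, ⟨f, hf, by simpa using h⟩⟩, rfl⟩
    · rintro ⟨p, ⟨hp, f, hf, h⟩, rfl⟩
      rcases hp with rfl | rfl | rfl | rfl | h'
      · exact ⟨f, hf, Or.inl ⟨rfl, h⟩⟩
      · exact ⟨f, hf, Or.inr (Or.inl ⟨rfl, h⟩)⟩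
      · exact ⟨f, hf, Or.inr (Or.inr (Or.inl ⟨rfl, h⟩))⟩
      · exact ⟨f, hf, Or.inr (Or.inr (Or.inr ⟨rfl, h⟩))⟩
      · exact h'.elim
  · have hn : (pvSkillPrefixes.map Prod.snd).Nodup := by decide
    exact List.Nodup.sublist (List.Sublist.map Prod.snd List.filter_sublist) hn
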